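-- pv_equiv track=rewrite | github.com/knowlp/caspr-coreference-tool | src/caspr.py | findCommonDocuments
-- ===== SOURCE A (Python) =====
-- def findCommonDocuments(annotationdata):
--   # extract only doc names in original order
--   docnames = [ adic[1].keys() for adic in annotationdata ]
--   # save original order
--   orderedDocs = docnames[0]
--   # map to sets
--   docnames = [ set(x) for x in docnames ]
--   # build intersection of all sets
--   commonDocs = docnames[0]
--   for dn in docnames[1:]:
--     commonDocs = commonDocs & dn
--   # get original order but only those present in all files
--   orderedDocs = [x for x in orderedDocs if x in commonDocs ]
--   return orderedDocs
-- ===== SOURCE B (Python) =====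
-- def findCommonDocuments(annotationdata):
--   # count in how many annotation dicts each doc name occurs, then keep the
--   # first dict's keys (in order) whose count equals the number of dicts
--   counts = {}
--   for adic in annotationdata:
--     for k in adic[1].keys():
--       counts[k] = counts.get(k, 0) + 1
--   n = len(annotationdata)
--   return [k for k in annotationdata[0][1].keys() if counts.get(k, 0) == n]
-- ===== Notes on version B (the rewrite author's own statement) =====
-- stated objective: alternative
-- what changed: Replaces the running set-intersection over all files by a single counting pass (a dict mapping each doc name to the number of files it occurs in) followed by a threshold filter over the first file's keys.
import Mathlib
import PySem

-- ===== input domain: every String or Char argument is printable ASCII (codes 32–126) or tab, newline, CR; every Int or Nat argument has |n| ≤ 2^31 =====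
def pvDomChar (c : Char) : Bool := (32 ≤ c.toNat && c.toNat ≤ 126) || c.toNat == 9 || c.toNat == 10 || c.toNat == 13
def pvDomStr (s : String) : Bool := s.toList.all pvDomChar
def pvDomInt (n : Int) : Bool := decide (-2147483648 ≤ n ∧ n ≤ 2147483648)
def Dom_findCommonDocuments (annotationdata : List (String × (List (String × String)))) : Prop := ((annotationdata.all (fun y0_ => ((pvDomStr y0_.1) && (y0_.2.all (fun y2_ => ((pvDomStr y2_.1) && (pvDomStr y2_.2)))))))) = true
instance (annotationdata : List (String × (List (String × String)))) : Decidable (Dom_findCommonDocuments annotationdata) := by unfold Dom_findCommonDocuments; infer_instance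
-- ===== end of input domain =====

-- B replaces A's running set-intersection by one counting pass plus a threshold
-- filter over the first file's keys; equivalence is about the return value only.

-- dict.keys() of an association dict: the distinct keys in first-insertion order
def pvKeys (l : List (String × String)) : List String := PySem.List.dedup (l.map Prod.fst)

-- ===== PORT A =====
def findCommonDocuments (annotationdata : List (String × (List (String × String)))) : List String :=
  let docnames := annotationdata.map (fun adic => pvKeys adic.2)
  match docnames with
  | [] => []  -- Python: docnames[0] raises IndexError here (excluded by Pre_)
  | o :: rest =>
      let orderedDocs := o
      let sets := rest.map (fun x => PySem.Set.ofList x)   -- docnames[1:] as sets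
      let commonDocs := sets.foldl PySem.Set.inter (PySem.Set.ofList o)
      orderedDocs.filter (fun x => PySem.Set.contains commonDocs x)

-- ===== PORT B =====
def findCommonDocuments_alt (annotationdata : List (String × (List (String × String)))) : List String :=
  let counts : PySem.Dict String Int :=
    annotationdata.foldl
      (fun d adic => (pvKeys adic.2).foldl (fun d k => d.insert k (d.getD k 0 + 1)) d)
      PySem.Dict.empty
  let n : Int := annotationdata.length
  match annotationdata with
  | [] => []  -- Python: annotationdata[0] raises IndexError here (excluded by Pre_)
  | a0 :: _ => (pvKeys a0.2).filter (fun k => counts.getD k 0 == n)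

-- ===== PRECONDITION & SPEC =====
-- Pre_ excludes exactly the empty list, on which the Python A raises IndexError.
def Pre_findCommonDocuments (annotationdata : List (String × (List (String × String)))) : Prop :=
  annotationdata ≠ []
instance (annotationdata : List (String × (List (String × String)))) : Decidable (Pre_findCommonDocuments annotationdata) := by unfold Pre_findCommonDocuments; infer_instance

def pvWitness_findCommonDocuments : (List (String × (List (String × String)))) :=
  [("f1", [("a", "x"), ("b", "y")]), ("f2", [("b", "1"), ("a", "2"), ("c", "3")])]

def Spec_findCommonDocuments (annotationdata : List (String × (List (String × String)))) (out : List String) : Prop := out = findCommonDocuments_alt annotationdata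
instance (annotationdata : List (String × (List (String × String)))) (out : List String) : Decidable (Spec_findCommonDocuments annotationdata out) := by unfold Spec_findCommonDocuments; infer_instance

-- ===== CLAIM (what is proved, stated in full; the proofs are below) =====
def Claim_equal_findCommonDocuments : Prop := ∀ (annotationdata : List (String × (List (String × String)))), Dom_findCommonDocuments annotationdata → Pre_findCommonDocuments annotationdata → Spec_findCommonDocuments annotationdata (findCommonDocuments annotationdata)

-- ===== LEMMAS AND PROOFS =====

-- membership in A's running intersection
theorem mem_foldl_inter (ts : List (PySem.Set String)) (s : PySem.Set String) (x : String) :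
    x ∈ ts.foldl PySem.Set.inter s ↔ x ∈ s ∧ ∀ t ∈ ts, x ∈ t := by
  induction ts generalizing s with
  | nil => simp
  | cons t ts ih =>
      simp [List.foldl_cons, ih, PySem.Set.mem_inter]
      tauto

-- B's counter after the whole outer loop: the count of k is the number of
-- dicts whose key list contains k
theorem getD_counts (l : List (String × (List (String × String)))) (d : PySem.Dict String Int) (k : String) :
    (l.foldl (fun d adic => (pvKeys adic.2).foldl (fun d k => d.insert k (d.getD k 0 + 1)) d) d).getD k 0
      = d.getD k 0 + (l.countP (fun adic => decide (k ∈ pvKeys adic.2)) : Int) := by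
  induction l generalizing d with
  | nil => simp
  | cons a l ih =>
      rw [List.foldl_cons, ih, PySem.Dict.getD_foldl_insert_add_one, List.countP_cons]
      have : (pvKeys a.2).count k = if k ∈ pvKeys a.2 then 1 else 0 := by
        by_cases h : k ∈ pvKeys a.2
        · simp [h, List.count_eq_one_of_mem (by simp [pvKeys]) h]
        · simp [h, List.count_eq_zero_of_not_mem h]
      by_cases h : k ∈ pvKeys a.2 <;> simp [this, h] <;> ring

-- ===== VERDICT (by name: the statement is the Claim_ definition above) =====
theorem findCommonDocuments_spec : Claim_equal_findCommonDocuments := by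
  intro ad _ hpre
  unfold Spec_findCommonDocuments
  match ad with
  | [] => exact absurd rfl hpre
  | a0 :: rest =>
    simp only [findCommonDocuments, findCommonDocuments_alt, List.map_cons, List.map_map]
    apply List.filter_congr
    intro k hk
    rw [Bool.eq_iff_iff, PySem.Set.contains_iff, mem_foldl_inter, getD_counts]
    simp only [PySem.Dict.getD_empty, zero_add, PySem.Set.mem_ofList, beq_iff_eq, List.mem_map,
      Function.comp]
    constructor
    · rintro ⟨h0, hall⟩
      have hmem : ∀ a ∈ a0 :: rest, k ∈ pvKeys a.2 := by
        intro a ha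
        rcases List.mem_cons.mp ha with h | h
        · rw [h]; exact h0
        · exact (PySem.Set.mem_ofList _ _).mp (hall _ ⟨a, h, rfl⟩)
      have : List.countP (fun adic => decide (k ∈ pvKeys adic.2)) (a0 :: rest)
          = (a0 :: rest).length :=
        List.countP_eq_length.mpr (fun a ha => by simpa using hmem a ha)
      rw [this]
    · intro hcount
      have hlen : List.countP (fun adic => decide (k ∈ pvKeys adic.2)) (a0 :: rest)
          = (a0 :: rest).length := by exact_mod_cast hcount
      have hmem := List.countP_eq_length.mp hlen
      refine ⟨by simpa using hmem a0 (by simp), ?_⟩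
      rintro t ⟨a, ha, rfl⟩
      exact (PySem.Set.mem_ofList _ _).mpr (by simpa using hmem a (by simp [ha]))
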